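-- pv_equiv track=rewrite | github.com/Julesc013/dominium | scripts/ci/check_comment_density.py | count_comment_lines
-- ===== SOURCE A (Python) =====
-- def count_comment_lines(text):
--     lines = text.split("\n")
--     total = 0
--     comment_lines = 0
--     in_block = False
--     for line in lines:
--         if not line.strip():
--             continue
--         total += 1
--         i = 0
--         has_comment = False
--         while i < len(line):
--             ch = line[i]
--             nxt = line[i + 1] if i + 1 < len(line) else ""
--             if in_block:
--                 has_comment = True
--                 end = line.find("*/", i)
--                 if end == -1:
--                     break
--                 in_block = False
--                 i = end + 2
--                 continue
--             if ch == "/" and nxt == "/":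
--                 has_comment = True
--                 break
--             if ch == "/" and nxt == "*":
--                 has_comment = True
--                 in_block = True
--                 i += 2
--                 continue
--             i += 1
--         if has_comment:
--             comment_lines += 1
--     return total, comment_lines
-- ===== SOURCE B (Python) =====
-- def _scan_line(line, in_block):
--     # Token-jump scanner: instead of walking character by character, jump
--     # between comment delimiters with str.find.  Returns (has_comment, in_block).
--     has = False
--     i = 0
--     while True:
--         if in_block:
--             has = True
--             m = line.find("*/", i)
--             if m == -1:
--                 return has, True
--             in_block = False
--             i = m + 2
--         else:
--             j = line.find("//", i)
--             k = line.find("/*", i)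
--             if j != -1 and (k == -1 or j < k):
--                 return True, False
--             if k == -1:
--                 return has, False
--             has = True
--             in_block = True
--             i = k + 2
--
--
-- def count_comment_lines(text):
--     lines = text.split("\n")
--     total = sum(1 for line in lines if line.strip())
--     comment_lines = 0
--     in_block = False
--     for line in lines:
--         has, in_block = _scan_line(line, in_block)
--         if has and line.strip():
--             comment_lines += 1
--     return total, comment_lines
-- ===== Notes on version B (the rewrite author's own statement) =====
-- stated objective: faster
-- what changed: A's per-character inner state walk (inspecting line[i], line[i+1] one position at a time) is replaced by a token-jump scanner that leaps between comment delimiters with str.find, and the non-blank total is computed by a separate comprehension instead of being threaded through the stateful loop.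
import Mathlib
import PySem

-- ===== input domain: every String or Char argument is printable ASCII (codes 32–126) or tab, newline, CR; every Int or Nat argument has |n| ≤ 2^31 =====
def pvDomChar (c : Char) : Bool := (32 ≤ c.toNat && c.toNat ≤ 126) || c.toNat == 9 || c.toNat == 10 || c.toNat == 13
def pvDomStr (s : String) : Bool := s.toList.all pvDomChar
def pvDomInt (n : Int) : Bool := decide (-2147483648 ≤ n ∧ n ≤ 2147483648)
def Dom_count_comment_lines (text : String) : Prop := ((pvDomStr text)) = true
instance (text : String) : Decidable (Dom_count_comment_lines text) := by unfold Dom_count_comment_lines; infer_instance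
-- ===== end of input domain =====

-- B replaces A's per-character state walk by a token-jump scanner (str.find jumps
-- between comment delimiters) and computes the non-blank total as a separate
-- comprehension; objective: faster (constant factor: the scanning runs inside str.find).

-- Helper fact cited by the ports' decreasing_by: a successful find starts at or
-- after the requested start index and the match fits inside the string.
theorem pvFindFrom_found (s sub : List Char) (k : Nat) (hsub : sub ≠ [])
    (h : PySem.Chars.findFrom s sub (k : Int) ≠ -1) :
    k ≤ s.length ∧ (k : Int) ≤ PySem.Chars.findFrom s sub (k : Int) ∧
      sub <+: s.drop (PySem.Chars.findFrom s sub (k : Int)).toNat ∧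
      (PySem.Chars.findFrom s sub (k : Int)).toNat + sub.length ≤ s.length := by
  have hk : k ≤ s.length := by
    by_contra hk
    apply h
    simp only [PySem.Chars.findFrom]
    have h1 : (s.length : Int) < (k : Int) := by omega
    have h2 : ¬ ((k : Int) < 0) := by omega
    simp [h1, h2]
  obtain ⟨h1, h2, _⟩ := PySem.Chars.findFrom_natCast_spec s sub k hk h
  refine ⟨hk, h1, h2, ?_⟩
  have hlen := h2.length_le
  simp only [List.length_drop] at hlen
  have hpos : 0 < sub.length := List.length_pos_of_ne_nil hsub
  have hnn : (0 : Int) ≤ PySem.Chars.findFrom s sub (k : Int) := le_trans (by omega) h1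
  omega

-- ===== PORT A =====
-- per-line character walk of A's inner `while i < len(line)` loop;
-- returns (has_comment, in_block) at line end
def aWalk (cs : List Char) (inBlock : Bool) (i : Nat) (has : Bool) : Bool × Bool :=
  if hi : i < cs.length then
    if inBlock then
      -- has_comment = True; end = line.find("*/", i)
      let e := PySem.Chars.findFrom cs ['*', '/'] (i : Int)
      if he : e = -1 then (true, true)                      -- break, still in block
      else aWalk cs false (e.toNat + 2) true                -- in_block = False; i = end + 2
    else
      if cs[i]? = some '/' ∧ cs[i+1]? = some '/' then (true, inBlock)  -- "//": break
      else if cs[i]? = some '/' ∧ cs[i+1]? = some '*' then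
        aWalk cs true (i + 2) true                          -- "/*": enter block
      else aWalk cs inBlock (i + 1) has                     -- i += 1
  else (has, inBlock)
termination_by cs.length - i
decreasing_by
  · have := pvFindFrom_found cs ['*', '/'] i (by simp) he
    simp only [List.length_cons, List.length_nil] at this
    omega
  · omega
  · omega

-- A's outer `for line in lines` loop carrying (in_block, total, comment_lines)
def aLoop : List (List Char) → Bool → Int → Int → Int × Int
  | [], _, total, cl => (total, cl)
  | line :: rest, inBlock, total, cl =>
    if PySem.Chars.strip line = [] then aLoop rest inBlock total cl   -- blank: continue
    else
      let r := aWalk line inBlock 0 false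
      aLoop rest r.2 (total + 1) (if r.1 then cl + 1 else cl)

def count_comment_lines (text : String) : Int × Int :=
  aLoop (PySem.Chars.splitOn text.toList ['\n']) false 0 0

-- ===== PORT B =====
-- B's token-jump scanner _scan_line: jump between delimiters with find
def bScan (cs : List Char) (inBlock : Bool) (i : Nat) (has : Bool) : Bool × Bool :=
  if inBlock then
    let m := PySem.Chars.findFrom cs ['*', '/'] (i : Int)
    if hm : m = -1 then (true, true)
    else bScan cs false (m.toNat + 2) true
  else
    let j := PySem.Chars.findFrom cs ['/', '/'] (i : Int)
    let k := PySem.Chars.findFrom cs ['/', '*'] (i : Int)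
    if j ≠ -1 ∧ (k = -1 ∨ j < k) then (true, false)
    else if hk : k = -1 then (has, false)
    else bScan cs true (k.toNat + 2) true
termination_by cs.length - i
decreasing_by
  · have := pvFindFrom_found cs ['*', '/'] i (by simp) hm
    simp only [List.length_cons, List.length_nil] at this
    omega
  · have := pvFindFrom_found cs ['/', '*'] i (by simp) hk
    simp only [List.length_cons, List.length_nil] at this
    omega

-- B's state fold for comment_lines only
def bLoop : List (List Char) → Bool → Int → Int
  | [], _, cl => cl
  | line :: rest, inBlock, cl =>
    let r := bScan line inBlock 0 false
    bLoop rest r.2 (if r.1 ∧ PySem.Chars.strip line ≠ [] then cl + 1 else cl)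

def count_comment_lines_alt (text : String) : Int × Int :=
  let lines := PySem.Chars.splitOn text.toList ['\n']
  -- total = sum(1 for line in lines if line.strip())
  ((lines.countP (fun l => !decide (PySem.Chars.strip l = [])) : Int),
   bLoop lines false 0)

-- ===== PRECONDITION & SPEC =====
def Spec_count_comment_lines (text : String) (out : Int × Int) : Prop := out = count_comment_lines_alt text
instance (text : String) (out : Int × Int) : Decidable (Spec_count_comment_lines text out) := by unfold Spec_count_comment_lines; infer_instance

-- ===== CLAIM (what is proved, stated in full; the proofs are below) =====
def Claim_equal_count_comment_lines : Prop := ∀ (text : String), Dom_count_comment_lines text → Spec_count_comment_lines text (count_comment_lines text)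

-- ===== LEMMAS AND PROOFS =====

-- a two-character pattern is a prefix exactly when the first two elements match
theorem pvPair_prefix (a b : Char) (l : List Char) :
    ([a, b] <+: l) ↔ l[0]? = some a ∧ l[1]? = some b := by
  match l with
  | [] => simp
  | [x] => simp [List.cons_prefix_cons]
  | x :: y :: t => simp [List.cons_prefix_cons, eq_comm]

-- advancing find's start index past a non-match position does not change the result
theorem pvFindFrom_step (s sub : List Char) (i : Nat) (hi : i < s.length)
    (hm : ¬ sub <+: s.drop i) :
    PySem.Chars.findFrom s sub (i : Int) = PySem.Chars.findFrom s sub ((i + 1 : Nat) : Int) := by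
  have hi1 : i + 1 ≤ s.length := hi
  have hdrop : s.drop i = s[i] :: s.drop (i + 1) := List.drop_eq_getElem_cons hi
  by_cases h1 : PySem.Chars.findFrom s sub (i : Int) = -1
  · rw [h1]
    symm
    rw [PySem.Chars.findFrom_natCast_eq_neg_one_iff s sub (i + 1) hi1]
    intro hinf
    have hno := (PySem.Chars.findFrom_natCast_eq_neg_one_iff s sub i (le_of_lt hi)).mp h1
    exact hno (by rw [hdrop]; exact List.infix_cons_iff.mpr (Or.inr hinf))
  · by_cases h2 : PySem.Chars.findFrom s sub ((i + 1 : Nat) : Int) = -1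
    · exfalso
      have hno := (PySem.Chars.findFrom_natCast_eq_neg_one_iff s sub (i + 1) hi1).mp h2
      have hinf : sub <:+: s.drop i :=
        by_contra fun hc => h1 ((PySem.Chars.findFrom_natCast_eq_neg_one_iff s sub i (le_of_lt hi)).mpr hc)
      rw [hdrop] at hinf
      rcases List.infix_cons_iff.mp hinf with hp | hi'
      · exact hm (by rw [hdrop]; exact hp)
      · exact hno hi'
    · obtain ⟨ha1, hp1, hmin1⟩ := PySem.Chars.findFrom_natCast_spec s sub i (le_of_lt hi) h1
      obtain ⟨ha2, hp2, hmin2⟩ := PySem.Chars.findFrom_natCast_spec s sub (i + 1) hi1 h2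
      set r1 := PySem.Chars.findFrom s sub (i : Int) with hr1
      set r2 := PySem.Chars.findFrom s sub ((i + 1 : Nat) : Int) with hr2
      have hne : r1.toNat ≠ i := fun h => hm (h ▸ hp1)
      have h1le : i + 1 ≤ r1.toNat := by omega
      have hlt1 : ¬ r1.toNat < r2.toNat := fun h => hmin2 r1.toNat h1le h hp1
      have hlt2 : ¬ r2.toNat < r1.toNat := fun h => hmin1 r2.toNat (by omega) h hp2
      omega

-- a line whose strip is empty consists of whitespace only
theorem pvStrip_nil_isspace (l : List Char) (h : PySem.Chars.strip l = []) :
    ∀ c ∈ l, PySem.Chars.isspace c = true := by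
  intro c hc
  simp only [PySem.Chars.strip, PySem.Chars.rstrip, PySem.Chars.lstrip] at h
  rw [List.reverse_eq_nil_iff, List.dropWhile_eq_nil_iff] at h
  have hl : ∀ x ∈ List.dropWhile PySem.Chars.isspace l, PySem.Chars.isspace x = true := by
    intro x hx
    exact h x (by simpa using hx)
  have := List.takeWhile_append_dropWhile (p := PySem.Chars.isspace) (l := l)
  rw [← this] at hc
  rcases List.mem_append.mp hc with h' | h'
  · exact List.mem_takeWhile_imp h'
  · exact hl c h'

-- no comment delimiter occurs in a whitespace-only line
theorem pvBlank_find (l sub : List Char) (h : PySem.Chars.strip l = [])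
    (hs : '/' ∈ sub) : PySem.Chars.findFrom l sub (0 : Int) = -1 := by
  have h0 : ((0 : Nat) : Int) = (0 : Int) := rfl
  rw [← h0, PySem.Chars.findFrom_natCast_eq_neg_one_iff l sub 0 (Nat.zero_le _)]
  intro hinf
  have : '/' ∈ l := by simpa using hinf.mem hs
  have := pvStrip_nil_isspace l h '/' this
  simp [PySem.Chars.isspace] at this

-- B's scanner is the identity on whitespace-only lines (state passes through)
theorem pvBScan_blank (l : List Char) (h : PySem.Chars.strip l = []) (inBlock : Bool) :
    bScan l inBlock 0 false = (inBlock, inBlock) := by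
  have h0 : ((0 : Nat) : Int) = (0 : Int) := rfl
  cases inBlock with
  | false =>
    rw [bScan]
    simp [pvBlank_find l ['/', '/'] h (by simp), pvBlank_find l ['/', '*'] h (by simp)]
  | true =>
    rw [bScan]
    simp [pvBlank_find l ['*', '/'] h (by simp)]

-- core: A's per-character walk computes the same result as B's token-jump scan
theorem pvWalk_eq (cs : List Char) (i : Nat) (inBlock has : Bool)
    (hpre : inBlock = true → has = true ∨ i < cs.length) :
    aWalk cs inBlock i has = bScan cs inBlock i has := by
  by_cases hi : i < cs.length
  · cases inBlock with
    | true =>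
      rw [aWalk, bScan]
      simp only [hi, dif_pos, if_pos]
      by_cases he : PySem.Chars.findFrom cs ['*', '/'] (i : Int) = -1
      · simp [he]
      · have hfound := pvFindFrom_found cs ['*', '/'] i (by simp) he
        simp only [he, dif_neg, not_false_iff]
        exact pvWalk_eq cs ((PySem.Chars.findFrom cs ['*', '/'] (i : Int)).toNat + 2) false true
          (by simp)
    | false =>
      rw [aWalk]
      simp only [hi, dif_pos, Bool.false_eq_true, if_false]
      have hget : cs[i]? = some cs[i] := List.getElem?_eq_getElem hi
      have hpp : ∀ b : Char, ['/', b] <+: cs.drop i ↔ (cs[i]? = some '/' ∧ cs[i+1]? = some b) := by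
        intro b
        rw [pvPair_prefix]
        constructor <;> (intro ⟨u, v⟩; constructor <;> simp_all [List.getElem?_drop])
      by_cases hsl : cs[i]? = some '/' ∧ cs[i+1]? = some '/'
      · -- "//" matches at i: j = i and (k = -1 or k > i)
        have hjp : ['/', '/'] <+: cs.drop i := (hpp '/').mpr hsl
        have hj : PySem.Chars.findFrom cs ['/', '/'] (i : Int) = (i : Int) := by
          by_cases hj1 : PySem.Chars.findFrom cs ['/', '/'] (i : Int) = -1
          · exact absurd ((PySem.Chars.findFrom_natCast_eq_neg_one_iff cs ['/', '/'] i hi.le).mp hj1)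
              (by intro hc; exact hc hjp.isInfix)
          · obtain ⟨ha, _, hmin⟩ := PySem.Chars.findFrom_natCast_spec cs ['/', '/'] i hi.le hj1
            have : ¬ i < (PySem.Chars.findFrom cs ['/', '/'] (i : Int)).toNat :=
              fun h => hmin i le_rfl h hjp
            omega
        have hk : PySem.Chars.findFrom cs ['/', '*'] (i : Int) = -1 ∨
            (i : Int) < PySem.Chars.findFrom cs ['/', '*'] (i : Int) := by
          by_cases hk1 : PySem.Chars.findFrom cs ['/', '*'] (i : Int) = -1
          · exact Or.inl hk1
          · obtain ⟨ha, hp, _⟩ := PySem.Chars.findFrom_natCast_spec cs ['/', '*'] i hi.le hk1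
            right
            rcases Nat.lt_or_ge i (PySem.Chars.findFrom cs ['/', '*'] (i : Int)).toNat with h | h
            · omega
            · have heq : (PySem.Chars.findFrom cs ['/', '*'] (i : Int)).toNat = i := by omega
              rw [heq, hpp '*'] at hp
              rw [hsl.2] at hp
              simp at hp
        have hcond : PySem.Chars.findFrom cs ['/', '/'] (i : Int) ≠ -1 ∧
            (PySem.Chars.findFrom cs ['/', '*'] (i : Int) = -1 ∨
             PySem.Chars.findFrom cs ['/', '/'] (i : Int) < PySem.Chars.findFrom cs ['/', '*'] (i : Int)) := by
          constructor
          · rw [hj]; omega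
          · rcases hk with h | h
            · exact Or.inl h
            · exact Or.inr (by rw [hj]; exact h)
        rw [if_pos hsl]
        conv_rhs => rw [bScan]
        simp only [Bool.false_eq_true, if_false]
        rw [if_pos hcond]
      · by_cases hst : cs[i]? = some '/' ∧ cs[i+1]? = some '*'
        · -- "/*" matches at i: k = i, j = -1 or j > i
          have hkp : ['/', '*'] <+: cs.drop i := (hpp '*').mpr hst
          have hk : PySem.Chars.findFrom cs ['/', '*'] (i : Int) = (i : Int) := by
            by_cases hk1 : PySem.Chars.findFrom cs ['/', '*'] (i : Int) = -1
            · exact absurd ((PySem.Chars.findFrom_natCast_eq_neg_one_iff cs ['/', '*'] i hi.le).mp hk1)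
                (by intro hc; exact hc hkp.isInfix)
            · obtain ⟨ha, _, hmin⟩ := PySem.Chars.findFrom_natCast_spec cs ['/', '*'] i hi.le hk1
              have : ¬ i < (PySem.Chars.findFrom cs ['/', '*'] (i : Int)).toNat :=
                fun h => hmin i le_rfl h hkp
              omega
          have hj : PySem.Chars.findFrom cs ['/', '/'] (i : Int) = -1 ∨
              (i : Int) < PySem.Chars.findFrom cs ['/', '/'] (i : Int) := by
            by_cases hj1 : PySem.Chars.findFrom cs ['/', '/'] (i : Int) = -1
            · exact Or.inl hj1
            · obtain ⟨ha, hp, _⟩ := PySem.Chars.findFrom_natCast_spec cs ['/', '/'] i hi.le hj1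
              right
              rcases Nat.lt_or_ge i (PySem.Chars.findFrom cs ['/', '/'] (i : Int)).toNat with h | h
              · omega
              · have heq : (PySem.Chars.findFrom cs ['/', '/'] (i : Int)).toNat = i := by omega
                rw [heq, hpp '/'] at hp
                rw [hst.2] at hp
                simp at hp
          have hnc : ¬ (PySem.Chars.findFrom cs ['/', '/'] (i : Int) ≠ -1 ∧
              (PySem.Chars.findFrom cs ['/', '*'] (i : Int) = -1 ∨
               PySem.Chars.findFrom cs ['/', '/'] (i : Int) < PySem.Chars.findFrom cs ['/', '*'] (i : Int))) := by
            rintro ⟨h1, h2 | h2⟩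
            · rw [h2] at hk; omega
            · rcases hj with h | h
              · exact h1 h
              · rw [hk] at h2; omega
          have hkne : PySem.Chars.findFrom cs ['/', '*'] (i : Int) ≠ -1 := by rw [hk]; omega
          have hktn : (PySem.Chars.findFrom cs ['/', '*'] (i : Int)).toNat = i := by rw [hk]; omega
          rw [if_neg hsl, if_pos hst]
          conv_rhs => rw [bScan]
          simp only [Bool.false_eq_true, if_false]
          rw [if_neg hnc, dif_neg hkne, hktn]
          exact pvWalk_eq cs (i + 2) true true (by simp)
        · -- no delimiter starts at i: advance both finds by one and recurse
          have hnj : ¬ ['/', '/'] <+: cs.drop i := fun h => hsl ((hpp '/').mp h)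
          have hnk : ¬ ['/', '*'] <+: cs.drop i := fun h => hst ((hpp '*').mp h)
          have hstepj := pvFindFrom_step cs ['/', '/'] i hi hnj
          have hstepk := pvFindFrom_step cs ['/', '*'] i hi hnk
          have hrec : aWalk cs false (i + 1) has = bScan cs false (i + 1) has :=
            pvWalk_eq cs (i + 1) false has (by simp)
          rw [if_neg hsl, if_neg hst, hrec]
          conv_lhs => rw [bScan]
          conv_rhs => rw [bScan]
          simp only [Bool.false_eq_true, if_false, hstepj, hstepk]
  · -- i ≥ length: both scans terminate immediately
    cases inBlock with
    | true =>
      have hhas : has = true := by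
        rcases hpre rfl with h | h
        · exact h
        · omega
      have hff : PySem.Chars.findFrom cs ['*', '/'] (i : Int) = -1 := by
        by_contra h
        have := pvFindFrom_found cs ['*', '/'] i (by simp) h
        simp only [List.length_cons, List.length_nil] at this
        omega
      rw [aWalk, bScan]
      simp [hi, hff, hhas]
    | false =>
      have hffj : PySem.Chars.findFrom cs ['/', '/'] (i : Int) = -1 := by
        by_contra h
        have := pvFindFrom_found cs ['/', '/'] i (by simp) h
        simp only [List.length_cons, List.length_nil] at this
        omega
      have hffk : PySem.Chars.findFrom cs ['/', '*'] (i : Int) = -1 := by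
        by_contra h
        have := pvFindFrom_found cs ['/', '*'] i (by simp) h
        simp only [List.length_cons, List.length_nil] at this
        omega
      rw [aWalk, bScan]
      simp [hi, hffj, hffk]
termination_by cs.length - i
decreasing_by all_goals omega

-- outer loops agree: A's single fold equals B's countP plus comment fold
theorem pvLoop_eq (lines : List (List Char)) : ∀ (inBlock : Bool) (total cl : Int),
    aLoop lines inBlock total cl =
      (total + ((lines.countP (fun l => !decide (PySem.Chars.strip l = []))) : Int),
       bLoop lines inBlock cl) := by
  induction lines with
  | nil => intro inBlock total cl; simp [aLoop, bLoop]
  | cons line rest ih =>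
    intro inBlock total cl
    by_cases hb : PySem.Chars.strip line = []
    · have hscan := pvBScan_blank line hb inBlock
      simp [aLoop, bLoop, hb, hscan, ih]
    · have hw : aWalk line inBlock 0 false = bScan line inBlock 0 false := by
        apply pvWalk_eq
        intro _
        right
        have : line ≠ [] := by
          intro h
          exact hb (by simp [h, PySem.Chars.strip, PySem.Chars.rstrip, PySem.Chars.lstrip])
        cases line with
        | nil => exact absurd rfl this
        | cons a t => simp
      simp [aLoop, bLoop, hb, hw, ih]
      omega
  -- (second component: A's `if has` equals B's `if has ∧ strip ≠ []` on a non-blank line)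

-- ===== VERDICT (by name: the statement is the Claim_ definition above) =====
theorem count_comment_lines_spec : Claim_equal_count_comment_lines := by
  intro text _
  unfold Spec_count_comment_lines count_comment_lines count_comment_lines_alt
  rw [pvLoop_eq]
  simp
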